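-- pv_equiv track=rewrite | github.com/anuu1989/nexus-ai | backend/models/llm_providers.py | _is_chat_model
-- ===== SOURCE A (Python) =====
-- def _is_chat_model(model_id: str) -> bool:
--     """Check if a model supports chat completions"""
--     # List of non-chat models that should be filtered out
--     non_chat_models = [
--         'whisper-large-v3',
--         'whisper-large-v3-turbo',
--         'distil-whisper-large-v3-en',
--         'whisper-1',
--         'tts-1',
--         'tts-1-hd',
--         'dall-e-2',
--         'dall-e-3',
--         'text-embedding-ada-002',
--         'text-embedding-3-small',
--         'text-embedding-3-large'
--     ]
--
--     # Check if model is in the non-chat list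
--     if model_id.lower() in [m.lower() for m in non_chat_models]:
--         return False
--
--     # Check if model name contains keywords indicating non-chat functionality
--     non_chat_keywords = ['whisper', 'tts', 'dall-e', 'embedding', 'moderation']
--     model_lower = model_id.lower()
--
--     for keyword in non_chat_keywords:
--         if keyword in model_lower:
--             return False
--
--     return True
-- ===== SOURCE B (Python) =====
-- def _is_chat_model(model_id: str) -> bool:
--     """Check if a model supports chat completions"""
--     # Every id in A's explicit non-chat list already contains one of these
--     # keywords, so a single keyword pass suffices.
--     model_lower = model_id.lower()
--     return not any(k in model_lower
--                    for k in ('whisper', 'tts', 'dall-e', 'embedding', 'moderation'))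
-- ===== Notes on version B (the rewrite author's own statement) =====
-- stated objective: simpler
-- what changed: Drops A's explicit non-chat-model list pass entirely (every listed id contains a keyword substring), leaving a single lowercase-then-keyword-substring check via not any(...).
import Mathlib
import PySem

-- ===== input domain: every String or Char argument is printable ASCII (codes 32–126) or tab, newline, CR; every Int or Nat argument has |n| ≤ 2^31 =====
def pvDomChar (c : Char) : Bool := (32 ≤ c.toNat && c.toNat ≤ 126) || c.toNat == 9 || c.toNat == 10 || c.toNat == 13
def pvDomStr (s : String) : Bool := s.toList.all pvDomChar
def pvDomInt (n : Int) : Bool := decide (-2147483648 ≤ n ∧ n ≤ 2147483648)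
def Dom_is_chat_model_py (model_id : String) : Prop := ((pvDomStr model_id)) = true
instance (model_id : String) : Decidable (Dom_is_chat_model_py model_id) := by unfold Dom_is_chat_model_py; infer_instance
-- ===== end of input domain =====

-- B drops A's redundant explicit non-chat-model list (every listed id contains a
-- keyword substring) and does a single keyword-substring pass: simpler, same values.

-- ===== PORT A =====
def pvNonChatModels : List String :=
  ["whisper-large-v3", "whisper-large-v3-turbo", "distil-whisper-large-v3-en",
   "whisper-1", "tts-1", "tts-1-hd", "dall-e-2", "dall-e-3",
   "text-embedding-ada-002", "text-embedding-3-small", "text-embedding-3-large"]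

-- the 'for keyword in non_chat_keywords: if keyword in model_lower: return False' loop
def pvKeywordLoop (model_lower : String) : List String → Bool
  | [] => true
  | k :: rest => if PySem.Str.isIn k model_lower then false else pvKeywordLoop model_lower rest

def is_chat_model_py (model_id : String) : Bool :=
  if (pvNonChatModels.map PySem.Str.lower).contains (PySem.Str.lower model_id) then
    false
  else
    pvKeywordLoop (PySem.Str.lower model_id)
      ["whisper", "tts", "dall-e", "embedding", "moderation"]

-- ===== PORT B =====
def is_chat_model_py_alt (model_id : String) : Bool :=
  let model_lower := PySem.Str.lower model_id
  !(["whisper", "tts", "dall-e", "embedding", "moderation"].any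
      (fun k => PySem.Str.isIn k model_lower))

-- ===== PRECONDITION & SPEC =====
def Spec_is_chat_model_py (model_id : String) (out : Bool) : Prop := out = is_chat_model_py_alt model_id
instance (model_id : String) (out : Bool) : Decidable (Spec_is_chat_model_py model_id out) := by unfold Spec_is_chat_model_py; infer_instance

-- ===== CLAIM (what is proved, stated in full; the proofs are below) =====
def Claim_equal_is_chat_model_py : Prop := ∀ (model_id : String), Dom_is_chat_model_py model_id → Spec_is_chat_model_py model_id (is_chat_model_py model_id)

-- ===== LEMMAS AND PROOFS =====

-- A's early-return keyword loop computes the negated 'any'.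
theorem pvKeywordLoop_eq_not_any (ml : String) (ks : List String) :
    pvKeywordLoop ml ks = !(ks.any (fun k => PySem.Str.isIn k ml)) := by
  induction ks with
  | nil => rfl
  | cons k rest ih =>
      rw [pvKeywordLoop]
      split_ifs with h
      · simp only [List.any_cons, h, Bool.true_or, Bool.not_true]
      · have hf : PySem.Str.isIn k ml = false := Bool.eq_false_iff.mpr h
        simp only [List.any_cons, hf, Bool.false_or, ih]

-- every lowered listed id contains a keyword, so B also returns false on the list
theorem pvListed_has_keyword (m : String)
    (h : (pvNonChatModels.map PySem.Str.lower).contains (PySem.Str.lower m) = true) :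
    is_chat_model_py_alt m = false := by
  have hmem : PySem.Str.lower m ∈ pvNonChatModels.map PySem.Str.lower := by
    simpa using h
  simp only [pvNonChatModels, List.map, List.mem_cons, List.not_mem_nil, or_false] at hmem
  unfold is_chat_model_py_alt
  rcases hmem with h|h|h|h|h|h|h|h|h|h|h <;> rw [h] <;> decide

-- ===== VERDICT (by name: the statement is the Claim_ definition above) =====
theorem is_chat_model_py_spec : Claim_equal_is_chat_model_py := by
  intro m _
  unfold Spec_is_chat_model_py is_chat_model_py
  split_ifs with h
  · exact (pvListed_has_keyword m h).symm
  · rw [pvKeywordLoop_eq_not_any]; rfl
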